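-- pv_equiv track=rewrite | github.com/spiacy-lin/hmcapitals | hmcapitol.py | get_hashed
-- ===== SOURCE A (Python) =====
-- def get_hashed(sentence):
--     ''' arg: word
--         zamienia word na  _ _
--         zatrzymuje spacje jako spacje
--         return str: hashed_password'''
--     wordh = ""
--     for i in range(len(sentence)):
--         if sentence[i] == chr(32):
--             wordh += " "
--         else:
--             wordh += "."
--     return wordh
-- ===== SOURCE B (Python) =====
-- def get_hashed(sentence):
--     return " ".join("." * len(seg) for seg in sentence.split(" "))
-- ===== Notes on version B (the rewrite author's own statement) =====
-- stated objective: faster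
-- what changed: Replaces the per-character index loop with string concatenation by a split-on-space/join pipeline that maps each non-space run to a run of dots.
import Mathlib
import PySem

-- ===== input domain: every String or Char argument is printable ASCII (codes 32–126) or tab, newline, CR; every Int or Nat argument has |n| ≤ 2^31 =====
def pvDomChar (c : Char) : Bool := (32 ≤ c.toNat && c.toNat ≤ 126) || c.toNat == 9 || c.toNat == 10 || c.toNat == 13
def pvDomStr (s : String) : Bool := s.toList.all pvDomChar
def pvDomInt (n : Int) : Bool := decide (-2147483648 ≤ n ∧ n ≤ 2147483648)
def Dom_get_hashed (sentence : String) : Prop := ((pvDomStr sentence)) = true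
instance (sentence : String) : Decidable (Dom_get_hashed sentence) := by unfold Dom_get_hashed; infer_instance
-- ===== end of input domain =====

-- B replaces A's per-character loop by a split-on-space/join pipeline (idiomatic rewrite, same result).

-- ===== PORT A =====
-- for i in range(len(sentence)): wordh += " " if sentence[i]==chr(32) else "."
def get_hashed (sentence : String) : String :=
  String.ofList (sentence.toList.foldl
    (fun wordh c => wordh ++ (if c = ' ' then [' '] else ['.'])) [])

-- ===== PORT B =====
-- " ".join("." * len(seg) for seg in sentence.split(" "))
def get_hashed_alt (sentence : String) : String :=
  String.ofList (PySem.Chars.join [' ']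
    ((PySem.Chars.splitOn sentence.toList [' ']).map
      (fun seg => List.replicate seg.length '.')))

-- ===== PRECONDITION & SPEC =====
def Spec_get_hashed (sentence : String) (out : String) : Prop := out = get_hashed_alt sentence
instance (sentence : String) (out : String) : Decidable (Spec_get_hashed sentence out) := by unfold Spec_get_hashed; infer_instance

-- ===== CLAIM (what is proved, stated in full; the proofs are below) =====
def Claim_equal_get_hashed : Prop := ∀ (sentence : String), Dom_get_hashed sentence → Spec_get_hashed sentence (get_hashed sentence)

-- ===== LEMMAS AND PROOFS =====

-- proof-side simple recursion describing split on a single space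
def pvSplitAux : List Char → List Char → List (List Char)
  | [], cur => [cur.reverse]
  | c :: rest, cur => if c = ' ' then cur.reverse :: pvSplitAux rest [] else pvSplitAux rest (c :: cur)

theorem pvSplitAux_ne_nil (l cur : List Char) : pvSplitAux l cur ≠ [] := by
  induction l generalizing cur with
  | nil => simp [pvSplitAux]
  | cons c rest ih => by_cases h : c = ' ' <;> simp [pvSplitAux, h, ih]

theorem splitOn_go_eq (l : List Char) : ∀ (fuel : Nat), l.length < fuel →
    ∀ (cur : List Char) (acc : List (List Char)),
    PySem.Chars.splitOn.go [' '] fuel l cur acc = acc.reverse ++ pvSplitAux l cur := by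
  induction l with
  | nil =>
      intro fuel hf cur acc
      cases fuel with
      | zero => omega
      | succ f => simp [PySem.Chars.splitOn.go, pvSplitAux]
  | cons c rest ih =>
      intro fuel hf cur acc
      cases fuel with
      | zero => omega
      | succ f =>
          by_cases h : c = ' '
          · subst h
            simp only [PySem.Chars.splitOn.go, List.isPrefixOf, pvSplitAux]
            simp [ih f (by simpa using Nat.lt_of_succ_lt_succ hf) [] (cur.reverse :: acc)]
          · simp only [PySem.Chars.splitOn.go, pvSplitAux, if_neg h]
            have hp : ([' '] : List Char).isPrefixOf (c :: rest) = false := by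
              simp [List.isPrefixOf]; intro hc; exact h hc.symm
            rw [hp]
            simp [ih f (by simpa using Nat.lt_of_succ_lt_succ hf) (c :: cur) acc]

theorem join_splitAux (l : List Char) : ∀ cur : List Char,
    PySem.Chars.join [' ']
      ((pvSplitAux l cur).map (fun seg => List.replicate seg.length '.'))
    = List.replicate cur.length '.' ++ l.map (fun c => if c = ' ' then ' ' else '.') := by
  induction l with
  | nil => intro cur; simp [pvSplitAux, PySem.Chars.join, List.intercalate]
  | cons c rest ih =>
      intro cur
      by_cases h : c = ' '
      · subst h
        have hne := pvSplitAux_ne_nil rest []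
        obtain ⟨p, ps, hps⟩ : ∃ p ps, pvSplitAux rest [] = p :: ps := by
          cases hrec : pvSplitAux rest [] with
          | nil => exact absurd hrec hne
          | cons p ps => exact ⟨p, ps, rfl⟩
        have ihr := ih []
        rw [hps] at ihr
        simp only [pvSplitAux, hps, List.map_cons,
          PySem.Chars.join, List.intercalate] at ihr ⊢
        simp_all
      · simp only [pvSplitAux, ih (c :: cur), List.length_cons,
          List.replicate_succ', List.map_cons, if_neg h]
        simp

theorem foldl_mask (l : List Char) : ∀ acc : List Char,
    l.foldl (fun wordh c => wordh ++ (if c = ' ' then [' '] else ['.'])) acc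
    = acc ++ l.map (fun c => if c = ' ' then ' ' else '.') := by
  induction l with
  | nil => intro acc; simp
  | cons c rest ih =>
      intro acc
      by_cases h : c = ' ' <;> simp [List.foldl_cons, h, ih]

-- ===== VERDICT (by name: the statement is the Claim_ definition above) =====
theorem get_hashed_spec : Claim_equal_get_hashed := by
  intro s _
  unfold Spec_get_hashed get_hashed get_hashed_alt
  congr 1
  rw [foldl_mask, PySem.Chars.splitOn,
      splitOn_go_eq s.toList (s.toList.length + 1) (by omega) [] []]
  simp only [List.reverse_nil, List.nil_append, join_splitAux]
  simp
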